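-- pv_equiv track=rewrite | github.com/PennChopMicrobiomeProgram/unassigner | unassign/util.py | count_matching_pairs
-- ===== SOURCE A (Python) =====
-- def count_matching_pairs(xs, gap_char = "-"):
--     """Count number of pairs with matching values."""
--     match = 0
--     total_x1 = 0
--     total_x2 = 0
--     for x1, x2 in xs:
--         if x1 == x2:
--             match += 1
--         if x1 != gap_char:
--             total_x1 += 1
--         if x2 != gap_char:
--             total_x2 += 1
--     return match, total_x1, total_x2
-- ===== SOURCE B (Python) =====
-- def count_matching_pairs(xs, gap_char = "-"):
--     """Count number of pairs with matching values."""
--     rows = list(xs)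
--     match = sum(1 for x1, x2 in rows if x1 == x2)
--     total_x1 = sum(1 for x1, x2 in rows if x1 != gap_char)
--     total_x2 = sum(1 for x1, x2 in rows if x2 != gap_char)
--     return match, total_x1, total_x2
-- ===== Notes on version B (the rewrite author's own statement) =====
-- stated objective: alternative
-- what changed: Replaces the single fused loop maintaining three counters with three independent per-criterion scans (sum-of-comprehension counts) over a materialized list.
import Mathlib
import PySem

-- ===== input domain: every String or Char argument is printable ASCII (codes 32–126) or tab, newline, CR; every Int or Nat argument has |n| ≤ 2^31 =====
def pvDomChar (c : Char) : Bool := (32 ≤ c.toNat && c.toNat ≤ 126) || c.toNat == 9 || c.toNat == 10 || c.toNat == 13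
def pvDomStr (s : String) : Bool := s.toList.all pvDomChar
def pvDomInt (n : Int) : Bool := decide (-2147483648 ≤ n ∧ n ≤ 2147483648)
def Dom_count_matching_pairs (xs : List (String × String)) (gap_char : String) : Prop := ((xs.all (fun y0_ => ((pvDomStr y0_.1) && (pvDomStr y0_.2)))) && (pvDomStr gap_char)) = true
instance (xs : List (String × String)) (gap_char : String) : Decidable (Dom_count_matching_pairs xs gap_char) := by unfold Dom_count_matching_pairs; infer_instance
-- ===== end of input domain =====

-- B replaces A's single fused loop with three independent counting scans; objective: alternative decomposition.

-- ===== PORT A =====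
-- one pass, three accumulators updated together
def count_matching_pairs (xs : List (String × String)) (gap_char : String) : Int × Int × Int :=
  let st := xs.foldl (fun (st : Int × Int × Int) r =>
    let st := if r.1 == r.2 then (st.1 + 1, st.2.1, st.2.2) else st
    let st := if r.1 != gap_char then (st.1, st.2.1 + 1, st.2.2) else st
    if r.2 != gap_char then (st.1, st.2.1, st.2.2 + 1) else st) (0, 0, 0)
  st

-- ===== PORT B =====
-- three independent scans, one per count
def count_matching_pairs_alt (xs : List (String × String)) (gap_char : String) : Int × Int × Int :=
  let rows := xs
  let mtch : Int := (rows.countP (fun r => r.1 == r.2) : Nat)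
  let total_x1 : Int := (rows.countP (fun r => r.1 != gap_char) : Nat)
  let total_x2 : Int := (rows.countP (fun r => r.2 != gap_char) : Nat)
  (mtch, total_x1, total_x2)

-- ===== PRECONDITION & SPEC =====
def Spec_count_matching_pairs (xs : List (String × String)) (gap_char : String) (out : Int × Int × Int) : Prop := out = count_matching_pairs_alt xs gap_char
instance (xs : List (String × String)) (gap_char : String) (out : Int × Int × Int) : Decidable (Spec_count_matching_pairs xs gap_char out) := by unfold Spec_count_matching_pairs; infer_instance

-- ===== CLAIM (what is proved, stated in full; the proofs are below) =====
def Claim_equal_count_matching_pairs : Prop := ∀ (xs : List (String × String)) (gap_char : String), Dom_count_matching_pairs xs gap_char → Spec_count_matching_pairs xs gap_char (count_matching_pairs xs gap_char)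

-- ===== LEMMAS AND PROOFS =====
theorem cmp_foldl_shift (xs : List (String × String)) (gap_char : String)
    (a b c : Int) :
    xs.foldl (fun (st : Int × Int × Int) r =>
      let st := if r.1 == r.2 then (st.1 + 1, st.2.1, st.2.2) else st
      let st := if r.1 != gap_char then (st.1, st.2.1 + 1, st.2.2) else st
      if r.2 != gap_char then (st.1, st.2.1, st.2.2 + 1) else st) (a, b, c)
    = (a + (xs.countP (fun r => r.1 == r.2) : Nat),
       b + (xs.countP (fun r => r.1 != gap_char) : Nat),
       c + (xs.countP (fun r => r.2 != gap_char) : Nat)) := by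
  induction xs generalizing a b c with
  | nil => simp
  | cons hd tl ih =>
    by_cases h1 : (hd.1 == hd.2) = true <;> by_cases h2 : (hd.1 != gap_char) = true <;>
      by_cases h3 : (hd.2 != gap_char) = true <;>
      (simp only [List.foldl_cons, List.countP_cons, h1, h2, h3, if_true, if_false,
         eq_false, if_pos, if_neg, ite_true, ite_false]
       rw [ih]
       simp only [Prod.mk.injEq]
       push_cast
       refine ⟨by ring, by ring, by ring⟩)

-- ===== VERDICT (by name: the statement is the Claim_ definition above) =====
theorem count_matching_pairs_spec : Claim_equal_count_matching_pairs := by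
  intro xs gap_char _
  unfold Spec_count_matching_pairs count_matching_pairs count_matching_pairs_alt
  rw [cmp_foldl_shift]
  simp
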